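-- pv_equiv track=rewrite | github.com/Dagobah369/UNI-Unit-Normalizazed-information | ARI.py | build_uni_composite_table
-- ===== SOURCE A (Python) =====
-- def build_uni_composite_table(N: int) -> list:
--     """Builds the UNI composite number table."""
--     composite = [False] * (N + 1)
--     for i in range(2, N + 1):
--         for j in range(i, N + 1):
--             product = i * j
--             if product <= N:
--                 composite[product] = True
--     return composite
-- ===== SOURCE B (Python) =====
-- def build_uni_composite_table(N: int) -> list:
--     """Builds the UNI composite number table."""
--     def is_composite(k):
--         d = 2
--         while d * d <= k:
--             if k % d == 0:
--                 return True
--             d += 1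
--         return False
--     return [is_composite(k) for k in range(N + 1)]
-- ===== Notes on version B (the rewrite author's own statement) =====
-- stated objective: faster
-- what changed: Instead of A's O(N^2) double loop that marks every product i*j, B computes each table entry directly by trial division up to sqrt(k), with no marking pass at all.
import Mathlib
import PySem

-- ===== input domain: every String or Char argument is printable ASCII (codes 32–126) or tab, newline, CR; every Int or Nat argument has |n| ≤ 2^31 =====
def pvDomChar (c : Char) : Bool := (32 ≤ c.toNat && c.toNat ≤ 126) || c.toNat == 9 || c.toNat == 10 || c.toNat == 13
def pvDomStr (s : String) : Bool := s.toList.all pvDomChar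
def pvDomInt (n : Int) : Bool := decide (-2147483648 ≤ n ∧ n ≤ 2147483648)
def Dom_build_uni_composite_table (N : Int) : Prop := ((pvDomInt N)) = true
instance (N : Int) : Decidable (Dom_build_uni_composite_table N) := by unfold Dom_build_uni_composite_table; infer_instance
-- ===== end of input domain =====

-- B replaces A's O(N^2) product-marking double loop by direct trial division per entry (faster).


-- ===== PORT A =====
-- literal port of A: composite = [False]*(N+1); nested loops mark composite[i*j] = True.
-- pySetD is exact here: the index i*j is always in range (4 ≤ i*j ≤ N < length).
def build_uni_composite_table (N : Int) : List Bool :=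
  let composite := List.replicate (N + 1).toNat false
  (PySem.List.pyRange 2 (N + 1) 1).foldl (fun comp i =>
    (PySem.List.pyRange i (N + 1) 1).foldl (fun comp j =>
      let product := i * j
      if product ≤ N then PySem.List.pySetD comp product true else comp) comp) composite

-- ===== PORT B =====
-- B's inner while loop: trial division d = 2, 3, … while d*d ≤ k.
def pvTrial (k : Int) (d : Nat) : Bool :=
  if _h : (d : Int) * d ≤ k then
    if PySem.Int.mod k d = 0 then true else pvTrial k (d + 1)
  else false
termination_by k.toNat + 2 - d
decreasing_by
  have hk : (0:Int) ≤ k := le_trans (by positivity) _h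
  have hd : (d : Int) ≤ k.toNat + 1 := by nlinarith [Int.toNat_of_nonneg hk]
  omega

def build_uni_composite_table_alt (N : Int) : List Bool :=
  (PySem.List.pyRange 0 (N + 1) 1).map (fun k => pvTrial k 2)

-- ===== PRECONDITION & SPEC =====
def Spec_build_uni_composite_table (N : Int) (out : List Bool) : Prop := out = build_uni_composite_table_alt N
instance (N : Int) (out : List Bool) : Decidable (Spec_build_uni_composite_table N out) := by unfold Spec_build_uni_composite_table; infer_instance

-- ===== CLAIM (what is proved, stated in full; the proofs are below) =====
def Claim_equal_build_uni_composite_table : Prop := ∀ (N : Int), Dom_build_uni_composite_table N → Spec_build_uni_composite_table N (build_uni_composite_table N)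

-- ===== LEMMAS AND PROOFS =====

-- inner marking fold preserves length
lemma pvInnerLen (N i : Int) (js : List Int) (acc : List Bool) :
    (js.foldl (fun comp j =>
      if i * j ≤ N then PySem.List.pySetD comp (i * j) true else comp) acc).length = acc.length := by
  induction js generalizing acc with
  | nil => rfl
  | cons j js ih =>
      simp only [List.foldl_cons]
      rw [ih]
      split <;> simp [PySem.List.length_pySetD]

-- outer fold preserves length
lemma pvOuterLen (N : Int) (is : List Int) (acc : List Bool) :
    (is.foldl (fun comp i =>
      (PySem.List.pyRange i (N + 1) 1).foldl (fun comp j =>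
        if i * j ≤ N then PySem.List.pySetD comp (i * j) true else comp) comp) acc).length
      = acc.length := by
  induction is generalizing acc with
  | nil => rfl
  | cons i is ih =>
      simp only [List.foldl_cons]
      rw [ih, pvInnerLen]

-- inner marking fold: which entries are true (indices are nonneg on the used inputs)
lemma pvInnerGet (N i : Int) (js : List Int) (acc : List Bool) (k : Nat)
    (hpos : ∀ j ∈ js, 0 ≤ i * j) :
    ((js.foldl (fun comp j =>
      if i * j ≤ N then PySem.List.pySetD comp (i * j) true else comp) acc)[k]? = some true ↔
    (∃ j ∈ js, i * j ≤ N ∧ i * j = (k : Int) ∧ k < acc.length) ∨ acc[k]? = some true) := by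
  induction js generalizing acc with
  | nil => simp
  | cons j js ih =>
      have hj : 0 ≤ i * j := hpos j (by simp)
      simp only [List.foldl_cons]
      rw [ih _ (fun j' hj' => hpos j' (by simp [hj']))]
      have hstep : ((if i * j ≤ N then PySem.List.pySetD acc (i * j) true else acc)[k]? = some true
          ↔ (i * j ≤ N ∧ i * j = (k : Int) ∧ k < acc.length) ∨ acc[k]? = some true) := by
        by_cases hle : i * j ≤ N
        · simp only [hle, if_true, true_and]
          rw [PySem.List.pySetD_of_nonneg _ _ hj, List.getElem?_set]
          by_cases heq : (i * j).toNat = k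
          · by_cases hlen : k < acc.length
            · have heq2 : i * j = (k : Int) := by omega
              simp [hlen, heq2]
            · have hnone : acc[k]? = none := List.getElem?_eq_none (by omega)
              simp [heq, hlen]
          · have hne : i * j ≠ (k : Int) := by omega
            simp [heq, hne]
        · simp [hle]
      rw [hstep]
      have hlenstep : (if i * j ≤ N then PySem.List.pySetD acc (i * j) true else acc).length
          = acc.length := by split <;> simp [PySem.List.length_pySetD]
      constructor
      · rintro (⟨j', hj', h1, h2, h3⟩ | ⟨h1, h2, h3⟩ | h)
        · exact Or.inl ⟨j', List.mem_cons_of_mem _ hj', h1, h2, by rwa [hlenstep] at h3⟩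
        · exact Or.inl ⟨j, by simp, h1, h2, h3⟩
        · exact Or.inr h
      · rintro (⟨j', hj', h1, h2, h3⟩ | h)
        · rcases List.mem_cons.mp hj' with rfl | hmem
          · exact Or.inr (Or.inl ⟨h1, h2, h3⟩)
          · exact Or.inl ⟨j', hmem, h1, h2, by rwa [hlenstep]⟩
        · exact Or.inr (Or.inr h)

-- outer fold: which entries are true
lemma pvOuterGet (N : Int) (is : List Int) (acc : List Bool) (k : Nat)
    (hge : ∀ i ∈ is, 2 ≤ i) :
    ((is.foldl (fun comp i =>
      (PySem.List.pyRange i (N + 1) 1).foldl (fun comp j =>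
        if i * j ≤ N then PySem.List.pySetD comp (i * j) true else comp) comp) acc)[k]? = some true
    ↔ (∃ i ∈ is, ∃ j ∈ PySem.List.pyRange i (N + 1) 1,
         i * j ≤ N ∧ i * j = (k : Int) ∧ k < acc.length) ∨ acc[k]? = some true) := by
  induction is generalizing acc with
  | nil => simp
  | cons i is ih =>
      have hi : 2 ≤ i := hge i (by simp)
      have hpos : ∀ j ∈ PySem.List.pyRange i (N + 1) 1, 0 ≤ i * j := by
        intro j hj
        have := (PySem.List.mem_pyRange_one).mp hj
        nlinarith [this.1]
      simp only [List.foldl_cons]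
      rw [ih _ (fun i' hi' => hge i' (by simp [hi']))]
      rw [pvInnerGet N i _ _ _ hpos]
      constructor
      · rintro (⟨i', hi', j, hj, h1, h2, h3⟩ | ⟨j, hj, h1, h2, h3⟩ | h)
        · exact Or.inl ⟨i', List.mem_cons_of_mem _ hi', j, hj, h1, h2, by rwa [pvInnerLen] at h3⟩
        · exact Or.inl ⟨i, by simp, j, hj, h1, h2, h3⟩
        · exact Or.inr h
      · rintro (⟨i', hi', j, hj, h1, h2, h3⟩ | h)
        · rcases List.mem_cons.mp hi' with rfl | hmem
          · exact Or.inr (Or.inl ⟨j, hj, h1, h2, h3⟩)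
          · exact Or.inl ⟨i', hmem, j, hj, h1, h2, by rwa [pvInnerLen]⟩
        · exact Or.inr (Or.inr h)

-- trial division characterization
lemma pvTrialIff (k : Int) (d : Nat) :
    (pvTrial k d = true ↔ ∃ e : Nat, d ≤ e ∧ (e : Int) * e ≤ k ∧ PySem.Int.mod k e = 0) := by
  induction d using pvTrial.induct (k := k) with
  | case1 d h hm =>
      rw [pvTrial, dif_pos h, if_pos hm]
      simp only [true_iff]
      exact ⟨d, le_refl d, h, hm⟩
  | case2 d h hm ih =>
      rw [pvTrial, dif_pos h, if_neg hm]
      rw [ih]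
      constructor
      · rintro ⟨e, he, h2, h3⟩; exact ⟨e, by omega, h2, h3⟩
      · rintro ⟨e, he, h2, h3⟩
        refine ⟨e, ?_, h2, h3⟩
        rcases Nat.eq_or_lt_of_le he with rfl | hlt
        · exact absurd h3 hm
        · omega
  | case3 d h =>
      rw [pvTrial, dif_neg h]
      simp only [Bool.false_eq_true, false_iff]
      rintro ⟨e, he, h2, h3⟩
      apply h
      have : (d : Int) ≤ (e : Int) := by exact_mod_cast he
      nlinarith

-- the mark-everything condition agrees with trial division on every in-range index
lemma pvBridge (N : Int) (k : Nat) (hk : (k : Int) ≤ N) :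
    ((∃ i ∈ PySem.List.pyRange 2 (N + 1) 1, ∃ j ∈ PySem.List.pyRange i (N + 1) 1,
        i * j ≤ N ∧ i * j = (k : Int)) ↔ pvTrial (k : Int) 2 = true) := by
  rw [pvTrialIff]
  constructor
  · rintro ⟨i, hi, j, hj, hle, heq⟩
    have hi' := (PySem.List.mem_pyRange_one).mp hi
    have hj' := (PySem.List.mem_pyRange_one).mp hj
    have h2 : (i.toNat : Int) = i := Int.toNat_of_nonneg (by omega)
    refine ⟨i.toNat, by omega, ?_, ?_⟩
    · rw [h2]
      nlinarith [hi'.1, hj'.1]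
    · rw [h2, PySem.Int.mod_eq_zero_iff_dvd]
      exact ⟨j, heq.symm⟩
  · rintro ⟨e, he, h2, h3⟩
    rw [PySem.Int.mod_eq_zero_iff_dvd] at h3
    obtain ⟨m, hm⟩ := h3
    have he2 : (2 : Int) ≤ (e : Int) := by exact_mod_cast he
    have hem : (e : Int) ≤ m := by nlinarith
    refine ⟨(e : Int), ?_, m, ?_, ?_, hm.symm⟩
    · rw [PySem.List.mem_pyRange_one]
      exact ⟨he2, by nlinarith⟩
    · rw [PySem.List.mem_pyRange_one]
      exact ⟨hem, by nlinarith⟩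
    · omega

-- ===== VERDICT (by name: the statement is the Claim_ definition above) =====
theorem build_uni_composite_table_spec : Claim_equal_build_uni_composite_table := by
  intro N _
  unfold Spec_build_uni_composite_table build_uni_composite_table build_uni_composite_table_alt
  apply List.ext_getElem?
  intro k
  by_cases hlen : k < (N + 1).toNat
  · have hkN : (k : Int) ≤ N := by omega
    have hmap : ((PySem.List.pyRange 0 (N + 1) 1).map (fun k => pvTrial k 2))[k]? =
        some (pvTrial (k : Int) 2) := by
      rw [List.getElem?_map, PySem.List.getElem?_pyRange_one]
      simp only [if_pos (show k < (N + 1 - 0).toNat by omega), Option.map_some, zero_add]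
    rw [hmap]
    have hrep : (List.replicate (N + 1).toNat false)[k]? = some false := by
      simp [hlen]
    have hiff := pvOuterGet N (PySem.List.pyRange 2 (N + 1) 1)
      (List.replicate (N + 1).toNat false) k
      (fun i hi => ((PySem.List.mem_pyRange_one).mp hi).1)
    have hcond : ((∃ i ∈ PySem.List.pyRange 2 (N + 1) 1, ∃ j ∈ PySem.List.pyRange i (N + 1) 1,
        i * j ≤ N ∧ i * j = (k : Int) ∧ k < (List.replicate (N + 1).toNat false).length) ∨
        (List.replicate (N + 1).toNat false)[k]? = some true) ↔ pvTrial (k : Int) 2 = true := by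
      rw [hrep]
      simp only [List.length_replicate]
      rw [← pvBridge N k hkN]
      constructor
      · rintro (⟨i, hi, j, hj, h1, h2, h3⟩ | h)
        · exact ⟨i, hi, j, hj, h1, h2⟩
        · exact absurd h (by simp)
      · rintro ⟨i, hi, j, hj, h1, h2⟩
        exact Or.inl ⟨i, hi, j, hj, h1, h2, hlen⟩
    rw [hcond] at hiff
    have hlt : k < (((PySem.List.pyRange 2 (N + 1) 1).foldl (fun comp i =>
        (PySem.List.pyRange i (N + 1) 1).foldl (fun comp j =>
          if i * j ≤ N then PySem.List.pySetD comp (i * j) true else comp) comp)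
        (List.replicate (N + 1).toNat false)).length) := by
      rw [pvOuterLen, List.length_replicate]; exact hlen
    obtain ⟨b, hb⟩ : ∃ b, (((PySem.List.pyRange 2 (N + 1) 1).foldl (fun comp i =>
        (PySem.List.pyRange i (N + 1) 1).foldl (fun comp j =>
          if i * j ≤ N then PySem.List.pySetD comp (i * j) true else comp) comp)
        (List.replicate (N + 1).toNat false))[k]? = some b) :=
      ⟨_, List.getElem?_eq_getElem hlt⟩
    rw [hb]
    rw [hb] at hiff
    cases b with
    | true => rw [hiff.mp rfl]
    | false =>
        cases htr : pvTrial (k : Int) 2 with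
        | false => rfl
        | true => exact absurd (hiff.mpr htr) (by simp)
  · have h1 : (((PySem.List.pyRange 2 (N + 1) 1).foldl (fun comp i =>
        (PySem.List.pyRange i (N + 1) 1).foldl (fun comp j =>
          if i * j ≤ N then PySem.List.pySetD comp (i * j) true else comp) comp)
        (List.replicate (N + 1).toNat false))[k]? = none) := by
      apply List.getElem?_eq_none
      rw [pvOuterLen, List.length_replicate]
      omega
    have h2 : ((PySem.List.pyRange 0 (N + 1) 1).map (fun k => pvTrial k 2))[k]? = none := by
      apply List.getElem?_eq_none
      simp [PySem.List.length_pyRange_one]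
      omega
    rw [h1, h2]
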